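-- pv_equiv track=rewrite | github.com/HenryBalthier/Python-Learning | huawei/q6.py | helper
-- ===== SOURCE A (Python) =====
-- def helper(n, count):
--     if n == 0 or n == 1:
--         return count
--     if n == 2:
--         return count + 1
--     if n >= 3:
--         a = n // 3 + n % 3
--
--         count = helper(a, count + n // 3)
--     return count
-- ===== SOURCE B (Python) =====
-- def helper(n, count):
--     if n < 0:
--         return count
--     return count + n // 2
-- ===== Notes on version B (the rewrite author's own statement) =====
-- stated objective: simpler
-- what changed: Replaces the recursion (count += n//3; n = n//3 + n%3 until n < 3) with the closed form count + n//2 for n >= 0 (count unchanged for negative n), eliminating the loop entirely.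
import Mathlib
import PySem

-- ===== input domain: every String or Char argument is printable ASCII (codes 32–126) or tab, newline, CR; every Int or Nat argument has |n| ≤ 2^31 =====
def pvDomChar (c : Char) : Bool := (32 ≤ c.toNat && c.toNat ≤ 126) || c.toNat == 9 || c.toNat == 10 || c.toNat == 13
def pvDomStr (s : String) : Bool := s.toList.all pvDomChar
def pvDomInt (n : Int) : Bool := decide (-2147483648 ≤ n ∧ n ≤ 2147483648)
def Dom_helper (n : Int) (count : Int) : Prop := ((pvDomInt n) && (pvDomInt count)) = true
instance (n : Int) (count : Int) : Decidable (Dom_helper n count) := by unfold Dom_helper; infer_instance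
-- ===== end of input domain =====

-- B replaces A's recursive reduction by the closed form count + n//2 (n ≥ 0); simpler, no recursion.


-- ===== PORT A =====
def helper (n : Int) (count : Int) : Int :=
  if n = 0 ∨ n = 1 then count
  else if n = 2 then count + 1
  else if 3 ≤ n then
    helper (PySem.Int.floordiv n 3 + PySem.Int.mod n 3) (count + PySem.Int.floordiv n 3)
  else count
termination_by n.toNat
decreasing_by
  rename_i _ _ h3
  rw [PySem.Int.floordiv_eq_ediv_of_pos (by omega), PySem.Int.mod_eq_emod_of_pos (by omega)]
  omega

-- ===== PORT B =====
def helper_alt (n : Int) (count : Int) : Int :=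
  if n < 0 then count
  else count + PySem.Int.floordiv n 2

-- ===== PRECONDITION & SPEC =====
def Spec_helper (n : Int) (count : Int) (out : Int) : Prop := out = helper_alt n count
instance (n : Int) (count : Int) (out : Int) : Decidable (Spec_helper n count out) := by unfold Spec_helper; infer_instance

-- ===== CLAIM (what is proved, stated in full; the proofs are below) =====
def Claim_equal_helper : Prop := ∀ (n : Int) (count : Int), Dom_helper n count → Spec_helper n count (helper n count)

-- ===== LEMMAS AND PROOFS =====

theorem helper_eq (n count : Int) : helper n count = helper_alt n count := by
  induction n, count using helper.induct with
  | case1 n count h =>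
      rw [helper, if_pos h]
      simp only [helper_alt, PySem.Int.floordiv]
      rcases h with h | h <;> subst h <;> simp [Int.fdiv]
  | case2 count h =>
      rw [helper, if_neg h, if_pos rfl]
      simp [helper_alt]
  | case3 n count h1 h2 h3 ih =>
      rw [helper, if_neg h1, if_neg h2, if_pos h3, ih, helper_alt, helper_alt]
      rw [PySem.Int.floordiv_eq_ediv_of_pos (b := 3) (by omega),
          PySem.Int.mod_eq_emod_of_pos (by omega)]
      rw [if_neg (by omega), if_neg (by omega)]
      rw [PySem.Int.floordiv_eq_ediv_of_pos (b := 2) (by omega),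
          PySem.Int.floordiv_eq_ediv_of_pos (b := 2) (by omega)]
      omega
  | case4 n count h1 h2 h3 =>
      rw [helper, if_neg h1, if_neg h2, if_neg h3, helper_alt, if_pos (by omega)]

-- ===== VERDICT (by name: the statement is the Claim_ definition above) =====
theorem helper_spec : Claim_equal_helper := by
  intro n count _
  exact helper_eq n count
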